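-- pv_equiv track=rewrite | github.com/martimrocha5/ATP2025 | Projeto/analisar.py | distribuicao_distritos
-- ===== SOURCE A (Python) =====
-- def distribuicao_distritos(lista):
--     """Frequência de distritos (Ordenado Alfabeticamente)."""
--     res = {}
--
--     for p in lista:
--         d = p["morada"]["distrito"]
--         if d in res:
--             res[d] += 1
--         else:
--             res[d] = 1
--
--     # Ordena o dicionário pelas chaves (nome do distrito)
--     return dict(sorted(res.items()))
-- ===== SOURCE B (Python) =====
-- def distribuicao_distritos(lista):
--     """Frequência de distritos (Ordenado Alfabeticamente)."""
--     # sort all district names, then count the runs of equal names in one scan: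
--     # run-length over a sorted list yields the districts already in alphabetical order.
--     nomes = sorted(p["morada"]["distrito"] for p in lista)
--     res = {}
--     while nomes:
--         d = nomes[0]
--         i = 1
--         while i < len(nomes) and nomes[i] == d:
--             i += 1
--         res[d] = i
--         nomes = nomes[i:]
--     return res
-- ===== Notes on version B (the rewrite author's own statement) =====
-- stated objective: alternative
-- what changed: Replaces the hash-map frequency count followed by sorting the (key,value) pairs with a sort of all district names followed by a single run-length scan over the sorted list, which yields the districts in alphabetical order directly.
import Mathlib
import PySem

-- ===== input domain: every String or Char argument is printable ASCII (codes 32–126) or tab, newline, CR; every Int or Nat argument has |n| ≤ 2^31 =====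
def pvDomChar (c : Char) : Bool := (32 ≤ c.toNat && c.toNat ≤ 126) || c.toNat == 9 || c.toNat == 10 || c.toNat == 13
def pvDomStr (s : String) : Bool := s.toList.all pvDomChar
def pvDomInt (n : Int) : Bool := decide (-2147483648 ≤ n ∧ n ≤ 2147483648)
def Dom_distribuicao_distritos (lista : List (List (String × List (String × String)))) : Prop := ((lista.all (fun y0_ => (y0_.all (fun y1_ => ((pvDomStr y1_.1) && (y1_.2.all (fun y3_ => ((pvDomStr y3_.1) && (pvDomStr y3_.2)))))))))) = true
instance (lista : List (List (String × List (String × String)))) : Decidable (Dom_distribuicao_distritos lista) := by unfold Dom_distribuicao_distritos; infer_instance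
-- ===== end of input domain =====

-- B replaces A's dict-counting-then-key-sort with sort-all-names-then-run-length-scan (alternative
-- algorithm, similar cost); equivalence is about the returned dict (as an ordered association list).

-- p["morada"]["distrito"]: exact under Pre_ (both keys present); Python raises KeyError otherwise,
-- and exactly those inputs are excluded by Pre_.
def distrito (p : List (String × List (String × String))) : String :=
  PySem.Dict.getD (PySem.Dict.mk (PySem.Dict.getD (PySem.Dict.mk p) "morada" [])) "distrito" ""

-- ===== PORT A =====
def distribuicao_distritos (lista : List (List (String × List (String × String)))) : List (String × Int) :=
  let res := lista.foldl (fun res p =>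
      let d := distrito p
      if res.contains d then res.insert d (res.getD d 0 + 1) else res.insert d 1)
    PySem.Dict.empty
  -- dict(sorted(res.items()))
  (PySem.Dict.ofList (PySem.List.sorted2 res.items Prod.fst Prod.snd)).items

-- ===== PORT B =====
-- the outer while loop of Source B: emit (head, length of its run), continue on the rest
def runsB : List String → List (String × Int)
  | [] => []
  | d :: rest =>
      (d, 1 + ((rest.takeWhile (· == d)).length : Int)) :: runsB (rest.dropWhile (· == d))
  termination_by s => s.length
  decreasing_by
    simp only [List.length_cons]
    exact Nat.lt_succ_of_le (List.length_dropWhile_le _ _)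

def distribuicao_distritos_alt (lista : List (List (String × List (String × String)))) : List (String × Int) :=
  runsB (PySem.List.sorted (lista.map distrito) (fun x => x))

-- ===== PRECONDITION & SPEC =====
-- Pre_ excludes exactly the inputs where A (and B) raise KeyError: an element without the key
-- "morada", or whose "morada" dict lacks the key "distrito".
def Pre_distribuicao_distritos (lista : List (List (String × List (String × String)))) : Prop :=
  (lista.all (fun p =>
    (PySem.Dict.mk p).contains "morada" &&
    (PySem.Dict.mk (PySem.Dict.getD (PySem.Dict.mk p) "morada" [])).contains "distrito")) = true
instance (lista : List (List (String × List (String × String)))) : Decidable (Pre_distribuicao_distritos lista) := by unfold Pre_distribuicao_distritos; infer_instance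

def pvWitness_distribuicao_distritos : (List (List (String × List (String × String)))) :=
  [[("morada", [("distrito", "Porto")])],
   [("nome", []), ("morada", [("rua", "X"), ("distrito", "Braga")])],
   [("morada", [("distrito", "Porto")])]]

def Spec_distribuicao_distritos (lista : List (List (String × List (String × String)))) (out : List (String × Int)) : Prop := out = distribuicao_distritos_alt lista
instance (lista : List (List (String × List (String × String)))) (out : List (String × Int)) : Decidable (Spec_distribuicao_distritos lista out) := by unfold Spec_distribuicao_distritos; infer_instance

-- ===== CLAIM (what is proved, stated in full; the proofs are below) =====
def Claim_equal_distribuicao_distritos : Prop := ∀ (lista : List (List (String × List (String × String)))), Dom_distribuicao_distritos lista → Pre_distribuicao_distritos lista → Spec_distribuicao_distritos lista (distribuicao_distritos lista)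

-- ===== LEMMAS AND PROOFS =====

-- sorted2 with keys fst, snd is sorted with the lexicographic key (Python's tuple comparison)
lemma sorted2_fst_snd_eq (xs : List (String × Int)) :
    PySem.List.sorted2 xs Prod.fst Prod.snd =
      PySem.List.sorted xs (fun x => toLex (x.1, x.2)) := by
  rw [PySem.List.sorted_eq_foldl_insertBy]
  show List.foldl (fun acc x => PySem.List.insertBy _ x acc) [] xs = _
  congr 1
  funext acc x
  congr 1
  funext a b
  rw [if_neg (by decide)]
  rw [← decide_not, ← Bool.decide_and, ← Bool.decide_or, decide_eq_decide,
    Prod.Lex.toLex_lt_toLex]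
  rcases lt_trichotomy a.1 b.1 with h | h | h
  · tauto
  · have h1 : ¬ a.1 < b.1 := by rw [h]; exact lt_irrefl _
    have h2 : ¬ b.1 < a.1 := by rw [h]; exact lt_irrefl _
    tauto
  · have h1 : ¬ a.1 < b.1 := lt_asymm h
    have h2 : a.1 ≠ b.1 := ne_of_gt h
    tauto

-- any strictly-fst-increasing rearrangement IS sorted(xs) (tuple keys never reach snd on distinct fsts)
lemma sorted2_eq_of_perm_of_pairwise_fst_lt (xs ys : List (String × Int))
    (hp : ys.Perm xs) (hlt : ys.Pairwise (fun a b => a.1 < b.1)) :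
    PySem.List.sorted2 xs Prod.fst Prod.snd = ys := by
  rw [sorted2_fst_snd_eq]
  exact PySem.List.sorted_eq_of_perm_of_pairwise_lt xs ys _ hp
    (hlt.imp (fun h => Prod.Lex.toLex_lt_toLex.mpr (Or.inl h)))

-- set(xs) keeps first occurrences, hence is a sublist of xs
lemma ofList_sublist_aux (xs : List String) (acc : List String) :
    (xs.foldl PySem.Set.add acc).Sublist (acc ++ xs) := by
  induction xs generalizing acc with
  | nil => simp
  | cons x xs ih =>
      refine (ih (PySem.Set.add acc x)).trans ?_
      unfold PySem.Set.add
      split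
      · exact (List.append_sublist_append_left acc).mpr (List.sublist_cons_self x xs)
      · rw [List.append_assoc, List.singleton_append]

lemma ofList_sublist (xs : List String) : (PySem.Set.ofList xs).Sublist xs := by
  have h := ofList_sublist_aux xs []
  simpa [PySem.Set.ofList_eq_foldl] using h

-- set([d] ++ t) = [d] when every element of t is d
lemma ofList_cons_all_eq (d : String) (t : List String) (ht : ∀ x ∈ t, x = d) :
    PySem.Set.ofList ([d] ++ t) = [d] := by
  rw [PySem.Set.ofList_append]
  have h1 : PySem.Set.ofList [d] = [d] := rfl
  rw [h1, PySem.Set.update_eq_append_filter]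
  have h2 : ∀ y ∈ PySem.Set.ofList t, (!PySem.Set.contains [d] y) = false := by
    intro y hy
    have hyd := ht y ((PySem.Set.mem_ofList t y).mp hy)
    subst hyd
    simp [PySem.Set.contains]
  rw [List.filter_eq_nil_iff.mpr (by intro y hy; rw [h2 y hy]; simp)]
  simp

-- run-length scan of a ≤-sorted list = first-occurrence dedup paired with counts
lemma runsB_eq_map_count (s : List String) (hs : s.Pairwise (· ≤ ·)) :
    runsB s = (PySem.Set.ofList s).map (fun k => (k, (s.count k : Int))) := by
  induction s using runsB.induct with
  | case1 => rw [runsB]; rfl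
  | case2 d rest ih =>
      have hpair := List.pairwise_cons.mp hs
      have hrest : rest.Pairwise (· ≤ ·) := hpair.2
      set t := rest.takeWhile (· == d) with htdef
      set r := rest.dropWhile (· == d) with hrdef
      have hsplit : rest = t ++ r := (List.takeWhile_append_dropWhile).symm
      have ht : ∀ x ∈ t, x = d := by
        intro x hx
        have := List.mem_takeWhile_imp hx
        simpa using this
      have hr_pw : r.Pairwise (· ≤ ·) := hrest.sublist (List.dropWhile_sublist _)
      -- d does not occur in r
      have hdr : d ∉ r := by
        intro hmem
        cases hhead : r with
        | nil => rw [hhead] at hmem; exact absurd hmem (List.not_mem_nil)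
        | cons y r' =>
            have hdw : rest.dropWhile (· == d) = y :: r' := hrdef.symm.trans hhead
            have hne : rest.dropWhile (· == d) ≠ [] := by simp [hdw]
            have h0 := List.head_dropWhile_not (· == d) hne
            have hyne : (y == d) = false := by simpa [hdw] using h0
            have hy : y ≠ d := by simpa using hyne
            have hdlty : d < y := by
              have hdy : d ≤ y := by
                refine hpair.1 y ?_
                rw [hsplit, hhead]
                exact List.mem_append_right t (List.mem_cons_self)
              exact lt_of_le_of_ne hdy (Ne.symm hy)
            rw [hhead] at hmem
            rcases List.mem_cons.mp hmem with h | h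
            · exact hy h.symm
            · have hr_pw' : (y :: r').Pairwise (· ≤ ·) := by rwa [hhead] at hr_pw
              have := (List.pairwise_cons.mp hr_pw').1 d h
              exact absurd (lt_of_lt_of_le hdlty this) (lt_irrefl d)
      -- the set: first occurrences
      have hset : PySem.Set.ofList (d :: rest) = d :: PySem.Set.ofList r := by
        have hsp2 : d :: rest = ([d] ++ t) ++ r := by simp [hsplit]
        rw [hsp2, PySem.Set.ofList_append, ofList_cons_all_eq d t ht,
          PySem.Set.update_eq_append_filter]
        have hflt : ∀ y ∈ PySem.Set.ofList r, (!PySem.Set.contains [d] y) = true := by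
          intro y hy
          have hyr := (PySem.Set.mem_ofList r y).mp hy
          have hyd : y ≠ d := by rintro rfl; exact hdr hyr
          simp [PySem.Set.contains, hyd]
        rw [List.filter_eq_self.mpr hflt]
        simp
      -- counts
      have hcount_d : (d :: rest).count d = 1 + t.length := by
        rw [hsplit, List.count_cons_self, List.count_append,
          List.count_eq_length.mpr (fun b hb => (ht b hb).symm),
          List.count_eq_zero.mpr hdr]
        omega
      have hcount_k : ∀ k ∈ PySem.Set.ofList r, (d :: rest).count k = r.count k := by
        intro k hk
        have hkr := (PySem.Set.mem_ofList r k).mp hk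
        have hkd : k ≠ d := by rintro rfl; exact hdr hkr
        have hkt : k ∉ t := by intro hkt; exact hkd (ht k hkt)
        rw [hsplit]
        simp [List.count_cons, List.count_append, List.count_eq_zero.mpr hkt]
        exact fun h => hkd h.symm
      have hhd : ((d :: rest).count d : Int) = 1 + (t.length : Int) := by
        rw [hcount_d]; push_cast; ring
      have htail : (PySem.Set.ofList r).map (fun k => (k, ((d :: rest).count k : Int)))
          = (PySem.Set.ofList r).map (fun k => (k, (r.count k : Int))) :=
        List.map_congr_left (fun k hk => by rw [hcount_k k hk])
      rw [hset, List.map_cons, htail, ← ih hr_pw, runsB, ← htdef, ← hrdef, hhd]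

-- A's counting loop builds Counter(names)
lemma foldA_eq_counter (lista : List (List (String × List (String × String)))) :
    lista.foldl (fun res p =>
      let d := distrito p
      if res.contains d then res.insert d (res.getD d 0 + 1) else res.insert d 1)
      PySem.Dict.empty = PySem.Dict.counter (lista.map distrito) := by
  rw [← PySem.Dict.foldl_insert_getD_add_one_eq_counter, List.foldl_map]
  apply PySem.List.foldl_congr_mem
  intro acc x _
  simp only []
  split
  · rfl
  · rename_i h
    rw [PySem.Dict.getD_of_not_contains _ _ (by simpa using h)]
    norm_num

-- dict(pairs) with pairwise-distinct keys keeps the pairs unchanged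
lemma items_ofList_of_nodup (L : List (String × Int)) (h : (L.map Prod.fst).Nodup) :
    (PySem.Dict.ofList L).items = L := by
  have := PySem.Dict.items_foldl_insert_fresh L Prod.fst Prod.snd PySem.Dict.empty
    (fun a _ => PySem.Dict.contains_empty _) h
  simpa [PySem.Dict.ofList, PySem.Dict.update, PySem.Dict.empty] using this

-- ===== VERDICT (by name: the statement is the Claim_ definition above) =====
theorem distribuicao_distritos_spec : Claim_equal_distribuicao_distritos := by
  intro lista _ _
  show distribuicao_distritos lista = distribuicao_distritos_alt lista
  unfold distribuicao_distritos distribuicao_distritos_alt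
  rw [foldA_eq_counter]
  show (PySem.Dict.ofList (PySem.List.sorted2
      (PySem.Dict.counter (lista.map distrito)).items Prod.fst Prod.snd)).items
    = runsB (PySem.List.sorted (lista.map distrito) (fun x => x))
  rw [PySem.Dict.items_counter]
  set names := lista.map distrito with hnames
  set s := PySem.List.sorted names (fun x => x) with hs
  have hs_pw : s.Pairwise (· ≤ ·) := PySem.List.sorted_pairwise names (fun x => x)
  rw [runsB_eq_map_count s hs_pw]
  have hcnt : ∀ k, s.count k = names.count k := fun k =>
    (PySem.List.sorted_perm names (fun x => x) false).count_eq k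
  have hmapeq : (PySem.Set.ofList s).map (fun k => (k, (s.count k : Int)))
      = (PySem.Set.ofList s).map (fun k => (k, (names.count k : Int))) := by
    apply List.map_congr_left
    intro k _
    rw [hcnt]
  rw [hmapeq]
  -- the target list: strictly increasing keys, a permutation of Counter(names).items
  have hperm_sets : (PySem.Set.ofList s).Perm (PySem.Set.ofList names) := by
    rw [List.perm_ext_iff_of_nodup (PySem.Set.nodup_ofList s) (PySem.Set.nodup_ofList names)]
    intro a
    rw [PySem.Set.mem_ofList, PySem.Set.mem_ofList, hs, PySem.List.mem_sorted]
  have hlt : (PySem.Set.ofList s).Pairwise (· < ·) := by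
    have h1 : (PySem.Set.ofList s).Pairwise (· ≤ ·) := hs_pw.sublist (ofList_sublist s)
    have h2 : (PySem.Set.ofList s).Pairwise (· ≠ ·) := PySem.Set.nodup_ofList s
    exact (h1.and h2).imp (fun h => lt_of_le_of_ne h.1 h.2)
  have hlt_map : ((PySem.Set.ofList s).map
      (fun k => (k, (names.count k : Int)))).Pairwise (fun a b => a.1 < b.1) :=
    List.pairwise_map.mpr (hlt.imp (fun h => h))
  rw [sorted2_eq_of_perm_of_pairwise_fst_lt _ _ (hperm_sets.map _) hlt_map]
  apply items_ofList_of_nodup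
  rw [List.map_map]
  have hid : ((fun (x : String × Int) => x.1) ∘ fun k => (k, (names.count k : Int))) = id := rfl
  rw [hid, List.map_id]
  exact PySem.Set.nodup_ofList s
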